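-- pv_equiv track=rewrite | github.com/Sunnoogo77/WebHawk | core/utils.py | detect_hidden_sqli_errors
-- ===== SOURCE A (Python) =====
-- def detect_hidden_sqli_errors(response_text):
--
--     SQLI_SIGNATURES = [
--         "You have an error in your SQL syntax",
--         "Warning: mysql_fetch",
--         "Unclosed quotation mark",
--         "Microsoft OLE DB Provider",
--         "SQLSTATE[",
--         "ODBC SQL Server Driver",
--         "Syntax error in string",
--         "Unknown column",
--         "Fatal error",
--         "MySQL server version",
--         "PostgreSQL query failed",
--         "syntax error",
--         "mysql_fetch",
--         "database error",
--         "unterminated string",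
--     ]
--
--     for signature in SQLI_SIGNATURES:
--         if signature.lower() in response_text.lower():
--             return True
--     return False
-- ===== SOURCE B (Python) =====
-- _SQLI_SIGNATURES = [
--     "You have an error in your SQL syntax",
--     "Warning: mysql_fetch",
--     "Unclosed quotation mark",
--     "Microsoft OLE DB Provider",
--     "SQLSTATE[",
--     "ODBC SQL Server Driver",
--     "Syntax error in string",
--     "Unknown column",
--     "Fatal error",
--     "MySQL server version",
--     "PostgreSQL query failed",
--     "syntax error",
--     "mysql_fetch",
--     "database error",
--     "unterminated string",
-- ]
--
-- _END = None  # terminal marker key inside a trie node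
--
--
-- def _build_trie(words):
--     root = {}
--     for w in words:
--         node = root
--         for ch in w:
--             node = node.setdefault(ch, {})
--         node[_END] = True
--     return root
--
--
-- _TRIE = _build_trie(s.lower() for s in _SQLI_SIGNATURES)
--
--
-- def _trie_match(node, text, i):
--     """Does some word stored in the trie start at position i of text?"""
--     if _END in node:
--         return True
--     if i < len(text):
--         child = node.get(text[i])
--         if child is not None:
--             return _trie_match(child, text, i + 1)
--     return False
--
--
-- def detect_hidden_sqli_errors(response_text):
--     low = response_text.lower()
--     return any(_trie_match(_TRIE, low, i) for i in range(len(low)))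
-- ===== Notes on version B (the rewrite author's own statement) =====
-- stated objective: alternative
-- what changed: B stores the lowered signatures in a prefix trie built once at module load and scans the lowered text once, walking the trie from each position, instead of A's 15 independent substring scans that each re-lower the whole text.
import Mathlib
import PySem

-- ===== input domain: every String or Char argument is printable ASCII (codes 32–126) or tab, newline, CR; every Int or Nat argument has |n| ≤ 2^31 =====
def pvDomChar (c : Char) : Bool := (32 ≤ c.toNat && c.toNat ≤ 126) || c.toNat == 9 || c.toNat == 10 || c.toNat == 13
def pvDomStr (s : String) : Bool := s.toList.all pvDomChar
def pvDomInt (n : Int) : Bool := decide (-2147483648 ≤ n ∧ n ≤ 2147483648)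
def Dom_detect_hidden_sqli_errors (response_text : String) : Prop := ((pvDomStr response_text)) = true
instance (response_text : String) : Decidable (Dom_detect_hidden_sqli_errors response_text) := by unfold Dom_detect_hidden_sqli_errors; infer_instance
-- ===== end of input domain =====

-- B replaces A's 15 independent lowered-substring scans by a prefix trie of the
-- lowered signatures, built once, walked from each position of the once-lowered text.

-- ===== PORT A =====
def sqliSignatures : List String := [
  "You have an error in your SQL syntax",
  "Warning: mysql_fetch",
  "Unclosed quotation mark",
  "Microsoft OLE DB Provider",
  "SQLSTATE[",
  "ODBC SQL Server Driver",
  "Syntax error in string",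
  "Unknown column",
  "Fatal error",
  "MySQL server version",
  "PostgreSQL query failed",
  "syntax error",
  "mysql_fetch",
  "database error",
  "unterminated string"]

-- A's loop with early return: try each signature in order
def detectLoopA (sigs : List String) (response_text : String) : Bool :=
  match sigs with
  | [] => false
  | s :: rest =>
    if PySem.Str.isIn (PySem.Str.lower s) (PySem.Str.lower response_text) then true
    else detectLoopA rest response_text

def detect_hidden_sqli_errors (response_text : String) : Bool :=
  detectLoopA sqliSignatures response_text

-- ===== PORT B =====
-- a trie node: terminal flag (Python's `_END in node`) + children association list
mutual
inductive Trie : Type where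
  | node : Bool → TrieKids → Trie
deriving DecidableEq
inductive TrieKids : Type where
  | nil : TrieKids
  | cons : Char → Trie → TrieKids → TrieKids
deriving DecidableEq
end

-- node.get(ch)
def childGet : TrieKids → Char → Option Trie
  | .nil, _ => none
  | .cons c' t rest, c => if c' = c then some t else childGet rest c

-- write a child back (setdefault's update: replace in place, else append)
def childSet : TrieKids → Char → Trie → TrieKids
  | .nil, c, t => .cons c t .nil
  | .cons c' t' rest, c, t =>
      if c' = c then .cons c' t rest else .cons c' t' (childSet rest c t)

-- insert one word (B's inner `for ch in w: node = node.setdefault(ch, {})`)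
def trieInsert : Trie → List Char → Trie
  | .node _ kids, [] => .node true kids
  | .node b kids, c :: w =>
      .node b (childSet kids c (trieInsert ((childGet kids c).getD (.node false .nil)) w))

-- _build_trie
def buildTrie (ws : List (List Char)) : Trie :=
  ws.foldl trieInsert (.node false .nil)

-- module-level _TRIE over the lowered signatures
def sqliTrie : Trie :=
  buildTrie (sqliSignatures.map (fun s => PySem.Chars.lower s.toList))

-- _trie_match, on the suffix of the text starting at position i
def trieMatch : Trie → List Char → Bool
  | .node b _, [] => b
  | .node b kids, c :: rest =>
      b || (match childGet kids c with
            | some t => trieMatch t rest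
            | none => false)

-- any(_trie_match(_TRIE, low, i) for i in range(len(low)))
def scanTrie (t : Trie) : List Char → Bool
  | [] => false
  | c :: rest => trieMatch t (c :: rest) || scanTrie t rest

def detect_hidden_sqli_errors_alt (response_text : String) : Bool :=
  scanTrie sqliTrie (PySem.Chars.lower response_text.toList)

-- ===== PRECONDITION & SPEC =====
def Spec_detect_hidden_sqli_errors (response_text : String) (out : Bool) : Prop := out = detect_hidden_sqli_errors_alt response_text
instance (response_text : String) (out : Bool) : Decidable (Spec_detect_hidden_sqli_errors response_text out) := by unfold Spec_detect_hidden_sqli_errors; infer_instance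

-- ===== CLAIM =====
def Claim_equal_detect_hidden_sqli_errors : Prop := ∀ (response_text : String), Dom_detect_hidden_sqli_errors response_text → Spec_detect_hidden_sqli_errors response_text (detect_hidden_sqli_errors response_text)

-- ===== LEMMAS AND PROOFS =====

-- A's early-return loop is an `any` over the signatures
theorem detectLoopA_eq_any (sigs : List String) (t : String) :
    detectLoopA sigs t = sigs.any (fun s => PySem.Str.isIn (PySem.Str.lower s) (PySem.Str.lower t)) := by
  induction sigs with
  | nil => rfl
  | cons s rest ih => simp [detectLoopA, ih]

-- exact membership of a word in the trie (walk the whole word, land on a terminal)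
def trieMem : Trie → List Char → Bool
  | .node b _, [] => b
  | .node _ kids, c :: w =>
      match childGet kids c with
      | some t => trieMem t w
      | none => false

theorem childGet_childSet : ∀ (kids : TrieKids) (c c' : Char) (t : Trie),
    childGet (childSet kids c t) c' = if c' = c then some t else childGet kids c'
  | .nil, c, c', t => by
      simp only [childSet, childGet]; split_ifs <;> simp_all [eq_comm]
  | .cons c₀ t₀ rest, c, c', t => by
      simp only [childSet]
      by_cases h₁ : c₀ = c
      · subst h₁
        simp only [childGet]
        split_ifs <;> simp_all [childGet, eq_comm]
      · rw [if_neg h₁]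
        simp only [childGet, childGet_childSet rest c c' t]
        split_ifs <;> simp_all [eq_comm]

theorem trieMem_empty (p : List Char) : trieMem (.node false .nil) p = false := by
  cases p <;> simp [trieMem, childGet]

theorem trieMem_insert (w : List Char) : ∀ (t : Trie) (p : List Char),
    trieMem (trieInsert t w) p = (decide (p = w) || trieMem t p) := by
  induction w with
  | nil =>
      rintro ⟨b, kids⟩ p
      cases p with
      | nil => simp [trieInsert, trieMem]
      | cons c q => simp [trieInsert, trieMem]
  | cons c w ih =>
      rintro ⟨b, kids⟩ p
      cases p with
      | nil => simp [trieInsert, trieMem]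
      | cons c' q =>
          simp only [trieInsert, trieMem, childGet_childSet]
          by_cases h : c' = c
          · simp only [h]
            cases hg : childGet kids c with
            | none => simp [ih, trieMem_empty]
            | some t => simp [ih]
          · simp [h]

theorem trieMem_build (ws : List (List Char)) (p : List Char) :
    trieMem (buildTrie ws) p = decide (p ∈ ws) := by
  suffices h : ∀ t, trieMem (ws.foldl trieInsert t) p = (decide (p ∈ ws) || trieMem t p) by
    rw [buildTrie, h, trieMem_empty, Bool.or_false]
  induction ws with
  | nil => intro t; simp
  | cons w ws ih =>
      intro t
      simp only [List.foldl_cons, ih, trieMem_insert, List.mem_cons]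
      by_cases h1 : p = w <;> by_cases h2 : p ∈ ws <;> simp [h1, h2]

-- the walk from one position finds exactly the prefixes stored in the trie
theorem trieMatch_iff (cs : List Char) : ∀ (t : Trie),
    trieMatch t cs = true ↔ ∃ p, p <+: cs ∧ trieMem t p = true := by
  induction cs with
  | nil =>
      rintro ⟨b, kids⟩
      simp only [trieMatch]
      constructor
      · intro h; exact ⟨[], List.prefix_refl _, h⟩
      · rintro ⟨p, hp, hm⟩
        rw [List.prefix_nil] at hp; subst hp; exact hm
  | cons c rest ih =>
      rintro ⟨b, kids⟩
      simp only [trieMatch, Bool.or_eq_true]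
      constructor
      · rintro (hb | h)
        · exact ⟨[], List.nil_prefix, hb⟩
        · cases hg : childGet kids c with
          | none => rw [hg] at h; simp at h
          | some t =>
              rw [hg] at h
              obtain ⟨p, hp, hm⟩ := (ih t).mp h
              exact ⟨c :: p, List.cons_prefix_cons.mpr ⟨rfl, hp⟩, by simp [trieMem, hg, hm]⟩
      · rintro ⟨p, hp, hm⟩
        cases p with
        | nil => exact Or.inl hm
        | cons c' q =>
            obtain ⟨hc, hq⟩ := List.cons_prefix_cons.mp hp
            subst hc
            simp only [trieMem] at hm
            cases hg : childGet kids c' with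
            | none => rw [hg] at hm; simp at hm
            | some t =>
                rw [hg] at hm
                exact Or.inr ((ih t).mpr ⟨q, hq, hm⟩)

theorem scanTrie_iff (t : Trie) (cs : List Char) :
    scanTrie t cs = true ↔ ∃ j, j < cs.length ∧ trieMatch t (cs.drop j) = true := by
  induction cs with
  | nil => simp [scanTrie]
  | cons c rest ih =>
      simp only [scanTrie, Bool.or_eq_true, ih]
      constructor
      · rintro (h | ⟨j, hj, h⟩)
        · exact ⟨0, by simp, h⟩
        · exact ⟨j + 1, by simpa using hj, h⟩
      · rintro ⟨j, hj, h⟩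
        cases j with
        | zero => exact Or.inl h
        | succ j => exact Or.inr ⟨j, by simpa using hj, h⟩

-- the B side, characterised: scanning with the trie of ws = some nonempty word occurs
theorem scanTrie_build_eq_any (ws : List (List Char)) (cs : List Char)
    (hne : ∀ w ∈ ws, w ≠ []) :
    scanTrie (buildTrie ws) cs = ws.any (fun w => PySem.Chars.isIn w cs) := by
  rw [Bool.eq_iff_iff]
  simp only [scanTrie_iff, List.any_eq_true, ← PySem.Chars.exists_prefix_drop_iff_isIn]
  constructor
  · rintro ⟨j, hj, h⟩
    obtain ⟨p, hp, hm⟩ := (trieMatch_iff _ _).mp h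
    rw [trieMem_build] at hm
    exact ⟨p, by simpa using hm, j, hp⟩
  · rintro ⟨w, hw, j, hp⟩
    have hwne := hne w hw
    have hdrop : cs.drop j ≠ [] := by
      intro h0; rw [h0, List.prefix_nil] at hp; exact hwne hp
    have hj : j < cs.length := by
      by_contra hle
      exact hdrop (List.drop_eq_nil_of_le (le_of_not_gt hle))
    exact ⟨j, hj, (trieMatch_iff _ _).mpr ⟨w, hp, by simp [trieMem_build, hw]⟩⟩

-- ===== VERDICT =====
theorem detect_hidden_sqli_errors_spec : Claim_equal_detect_hidden_sqli_errors := by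
  intro t _
  unfold Spec_detect_hidden_sqli_errors detect_hidden_sqli_errors detect_hidden_sqli_errors_alt
  rw [detectLoopA_eq_any, sqliTrie, scanTrie_build_eq_any _ _ (by decide), List.any_map]
  refine List.any_congr rfl fun s => ?_
  simp [PySem.Str.isIn, PySem.Str.toList_lower]
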